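-- pv_equiv track=rewrite | github.com/ztstiefel/python | flask-test.py | print_char_diff
-- ===== SOURCE A (Python) =====
-- def print_char_diff(char_diff):
--     sorted_char_diff = sorted(char_diff.items(), key=lambda x: x[0])
--
--     added_diff = []
--     removed_diff = []
--
--     for char, count in sorted_char_diff:
--         action = "removed" if count < 0 else "added"
--         if action == "removed":
--             removed_diff.append(f"{abs(count)} '{char}' needs to be {action}.")
--         else:
--             added_diff.append(f"{abs(count)} '{char}' needs to be {action}.")
--
--     sorted_diff_output = sorted(added_diff) + sorted(removed_diff)
--
--     return "<br>".join(sorted_diff_output)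
-- ===== SOURCE B (Python) =====
-- def print_char_diff(char_diff):
--     ordered = []
--     for char, count in char_diff.items():
--         item = (0 if count >= 0 else 1,
--                 f"{abs(count)} '{char}' needs to be {'removed' if count < 0 else 'added'}.")
--         pos = 0
--         while pos < len(ordered) and ordered[pos] < item:
--             pos += 1
--         ordered.insert(pos, item)
--     return "<br>".join(line for _, line in ordered)
-- ===== Notes on version B (the rewrite author's own statement) =====
-- stated objective: alternative
-- what changed: B makes a single online pass, inserting each tagged formatted line into one ordered list by a hand-written scan (insertion sort, no sorted() call at all), instead of A's key-sort + partition into two lists + two further sorts + concatenation.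
import Mathlib
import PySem

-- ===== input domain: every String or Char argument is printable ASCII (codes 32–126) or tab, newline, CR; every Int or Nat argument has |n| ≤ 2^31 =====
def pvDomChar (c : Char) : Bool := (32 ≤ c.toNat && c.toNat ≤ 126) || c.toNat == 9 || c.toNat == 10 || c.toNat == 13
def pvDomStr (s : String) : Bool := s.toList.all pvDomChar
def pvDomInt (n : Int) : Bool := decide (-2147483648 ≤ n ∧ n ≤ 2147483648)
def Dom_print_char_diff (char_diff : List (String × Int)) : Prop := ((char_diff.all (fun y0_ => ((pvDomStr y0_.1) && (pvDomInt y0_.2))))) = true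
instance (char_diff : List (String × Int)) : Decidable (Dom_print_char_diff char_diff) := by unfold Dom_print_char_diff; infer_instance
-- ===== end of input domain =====

-- B replaces A's three sorted() calls and two partition lists by ONE online pass that
-- inserts each tagged line into a single ordered list by a hand-written scan (insertion sort).

-- ===== PORT A =====
-- the f-string f"{abs(count)} '{char}' needs to be {action}." (both Pythons use this exact format)
def pvFmt (char : String) (count : Int) (action : String) : String :=
  PySem.Int.toStr (if count < 0 then -count else count) ++ " '" ++ char ++ "' needs to be " ++ action ++ "."

-- the body of A's for-loop: appends the line to removed_diff or added_diff
def pvStep (acc : List String × List String) (cc : String × Int) : List String × List String :=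
  let action := if cc.2 < 0 then "removed" else "added"
  if action = "removed" then (acc.1, acc.2 ++ [pvFmt cc.1 cc.2 action])
  else (acc.1 ++ [pvFmt cc.1 cc.2 action], acc.2)

def print_char_diff (char_diff : List (String × Int)) : String :=
  let sorted_char_diff := PySem.List.sorted (PySem.Dict.ofList char_diff).items (fun x => x.1) false
  let p := sorted_char_diff.foldl pvStep ([], [])
  PySem.Str.join "<br>" (PySem.List.sorted p.1 (fun s => s) false ++ PySem.List.sorted p.2 (fun s => s) false)

-- ===== PORT B =====
-- B's tagged item: (0 if count >= 0 else 1, formatted line)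
def pvTag (kv : String × Int) : Int × String :=
  ((if 0 ≤ kv.2 then 0 else 1), pvFmt kv.1 kv.2 (if kv.2 < 0 then "removed" else "added"))

-- Python tuple comparison ordered[pos] < item on (int, str)
def pvLtTup (a b : Int × String) : Bool := decide (a.1 < b.1) || (a.1 == b.1 && decide (a.2 < b.2))

-- B's while loop: pos = 0; while pos < len(ordered) and ordered[pos] < item: pos += 1
def pvFindPos (item : Int × String) : List (Int × String) → Nat
  | [] => 0
  | y :: ys => if pvLtTup y item then pvFindPos item ys + 1 else 0

def print_char_diff_alt (char_diff : List (String × Int)) : String :=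
  let ordered := (PySem.Dict.ofList char_diff).items.foldl
    (fun ordered kv =>
      let item := pvTag kv
      PySem.List.insert ordered ((pvFindPos item ordered : Nat) : Int) item) []
  PySem.Str.join "<br>" (ordered.map (fun t => t.2))

-- ===== PRECONDITION & SPEC =====
def Spec_print_char_diff (char_diff : List (String × Int)) (out : String) : Prop := out = print_char_diff_alt char_diff
instance (char_diff : List (String × Int)) (out : String) : Decidable (Spec_print_char_diff char_diff out) := by unfold Spec_print_char_diff; infer_instance

-- ===== CLAIM (what is proved, stated in full; the proofs are below) =====
def Claim_equal_print_char_diff : Prop := ∀ (char_diff : List (String × Int)), Dom_print_char_diff char_diff → Spec_print_char_diff char_diff (print_char_diff char_diff)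

-- ===== LEMMAS AND PROOFS =====

-- the line A and B format for an entry cc
def pvLine (cc : String × Int) : String :=
  pvFmt cc.1 cc.2 (if cc.2 < 0 then "removed" else "added")

-- the lexicographic key B's list is ordered by
def pvK (t : Int × String) : Int ×ₗ String := toLex t

-- A's loop splits the (key-sorted) items into added lines and removed lines, in order
lemma pv_foldl_split (L : List (String × Int)) (acc : List String × List String) :
    L.foldl pvStep acc
      = (acc.1 ++ (L.filter (fun cc => decide (0 ≤ cc.2))).map pvLine,
         acc.2 ++ (L.filter (fun cc => decide (cc.2 < 0))).map pvLine) := by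
  induction L generalizing acc with
  | nil => simp
  | cons cc T ih =>
    by_cases h : cc.2 < 0
    · have h' : ¬ (0 ≤ cc.2) := by omega
      simp [List.foldl_cons, ih, pvStep, pvLine, h, h']
    · have h' : 0 ≤ cc.2 := by omega
      simp [List.foldl_cons, ih, pvStep, pvLine, h, h']

-- the Python tuple '<' IS the strict lexicographic order on (Int, String)
lemma pv_ltTup_iff (a b : Int × String) : pvLtTup a b = true ↔ pvK a < pvK b := by
  rcases a with ⟨a1, a2⟩; rcases b with ⟨b1, b2⟩
  simp only [pvLtTup, pvK, Prod.Lex.toLex_lt_toLex]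
  by_cases h1 : a1 < b1 <;> by_cases h2 : a1 = b1 <;> by_cases h3 : a2 < b2 <;>
    simp [h1, h2, h3]

-- B's insertion, as one function (pvFindPos + list.insert)
def pvIns (item : Int × String) (l : List (Int × String)) : List (Int × String) :=
  PySem.List.insert l ((pvFindPos item l : Nat) : Int) item

lemma pv_findPos_le (item : Int × String) (l : List (Int × String)) :
    pvFindPos item l ≤ l.length := by
  induction l with
  | nil => simp [pvFindPos]
  | cons y ys ih =>
    simp only [pvFindPos]
    split_ifs
    · simp only [List.length_cons]; omega
    · simp

lemma pvIns_nil (item : Int × String) : pvIns item [] = [item] := rfl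

lemma pvIns_cons (item y : Int × String) (ys : List (Int × String)) :
    pvIns item (y :: ys)
      = if pvLtTup y item then y :: pvIns item ys else item :: y :: ys := by
  unfold pvIns
  by_cases h : pvLtTup y item
  · have h1 := pv_findPos_le item ys
    rw [if_pos h]
    simp only [pvFindPos, if_pos h]
    rw [PySem.List.insert_natCast _ _ _ (by simpa using Nat.succ_le_succ h1),
        PySem.List.insert_natCast _ _ _ h1]
    simp
  · rw [if_neg h]
    simp only [pvFindPos, if_neg h]
    rw [PySem.List.insert_natCast _ _ _ (by simp)]
    simp

lemma pvIns_perm (item : Int × String) (l : List (Int × String)) :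
    (pvIns item l).Perm (item :: l) := by
  induction l with
  | nil => simp [pvIns_nil]
  | cons y ys ih =>
    rw [pvIns_cons]
    split_ifs with h
    · exact (ih.cons y).trans (List.Perm.swap item y ys)
    · exact List.Perm.refl _

lemma pvIns_pairwise (item : Int × String) (l : List (Int × String))
    (hl : l.Pairwise (fun a b => pvK a ≤ pvK b)) :
    (pvIns item l).Pairwise (fun a b => pvK a ≤ pvK b) := by
  induction l with
  | nil => simp [pvIns_nil]
  | cons y ys ih =>
    rw [pvIns_cons]
    rcases List.pairwise_cons.mp hl with ⟨hy, hys⟩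
    split_ifs with h
    · refine List.pairwise_cons.mpr ⟨?_, ih hys⟩
      intro z hz
      rcases List.mem_cons.mp (((pvIns_perm item ys).mem_iff).mp hz) with hz | hz
      · subst hz; exact le_of_lt ((pv_ltTup_iff y z).mp h)
      · exact hy z hz
    · refine List.pairwise_cons.mpr ⟨?_, hl⟩
      intro z hz
      have hyi : pvK item ≤ pvK y := by
        by_contra hc
        exact h ((pv_ltTup_iff y item).mpr (lt_of_not_ge hc))
      rcases List.mem_cons.mp hz with hz | hz
      · subst hz; exact hyi
      · exact hyi.trans (hy z hz)

-- B's fold builds a list that is a permutation of the tagged items and key-ordered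
lemma pv_fold_invariant (items : List (String × Int)) :
    (items.foldl (fun ordered kv => pvIns (pvTag kv) ordered) []).Perm (items.map pvTag)
    ∧ (items.foldl (fun ordered kv => pvIns (pvTag kv) ordered) []).Pairwise
        (fun a b => pvK a ≤ pvK b) := by
  suffices h : ∀ (acc : List (Int × String)), acc.Pairwise (fun a b => pvK a ≤ pvK b) →
      (items.foldl (fun ordered kv => pvIns (pvTag kv) ordered) acc).Perm
        (acc ++ items.map pvTag)
      ∧ (items.foldl (fun ordered kv => pvIns (pvTag kv) ordered) acc).Pairwise
          (fun a b => pvK a ≤ pvK b) by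
    simpa using h [] (by simp)
  induction items with
  | nil =>
    intro acc hacc
    exact ⟨by simp, by simpa using hacc⟩
  | cons kv T ih =>
    intro acc hacc
    have hstep := pvIns_perm (pvTag kv) acc
    rcases ih (pvIns (pvTag kv) acc) (pvIns_pairwise _ _ hacc) with ⟨hp, hs⟩
    refine ⟨?_, hs⟩
    simp only [List.foldl_cons, List.map_cons]
    refine hp.trans ?_
    refine (hstep.append_right _).trans ?_
    rw [List.cons_append]
    exact List.perm_middle.symm

-- ===== main equality of the two line lists =====
lemma pv_main (items : List (String × Int)) :
    PySem.List.sorted ((PySem.List.sorted items (fun x => x.1) false).foldl pvStep ([], [])).1 (fun s => s) false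
      ++ PySem.List.sorted ((PySem.List.sorted items (fun x => x.1) false).foldl pvStep ([], [])).2 (fun s => s) false
    = (items.foldl (fun ordered kv => pvIns (pvTag kv) ordered) []).map (fun t => t.2) := by
  set L := PySem.List.sorted items (fun x => x.1) false with hLdef
  have hLperm : L.Perm items := PySem.List.sorted_perm items (fun x => x.1) false
  rw [pv_foldl_split]
  set F0 := L.filter (fun cc => decide (0 ≤ cc.2)) with hF0
  set F1 := L.filter (fun cc => decide (cc.2 < 0)) with hF1
  set A0 := PySem.List.sorted ([] ++ F0.map pvLine) (fun s => s) false with hA0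
  set A1 := PySem.List.sorted ([] ++ F1.map pvLine) (fun s => s) false with hA1
  have hA0p : A0.Perm (F0.map pvLine) := by
    rw [hA0]; simpa using PySem.List.sorted_perm (F0.map pvLine) (fun s => s) false
  have hA1p : A1.Perm (F1.map pvLine) := by
    rw [hA1]; simpa using PySem.List.sorted_perm (F1.map pvLine) (fun s => s) false
  have hmap0 : F0.map pvTag = (F0.map pvLine).map (fun s => ((0 : Int), s)) := by
    rw [List.map_map]
    refine List.map_congr_left ?_
    intro cc hcc
    have : 0 ≤ cc.2 := by
      have := (List.mem_filter.mp (hF0 ▸ hcc)).2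
      simpa using this
    simp [pvTag, pvLine, Function.comp, this]
  have hmap1 : F1.map pvTag = (F1.map pvLine).map (fun s => ((1 : Int), s)) := by
    rw [List.map_map]
    refine List.map_congr_left ?_
    intro cc hcc
    have h : cc.2 < 0 := by
      have := (List.mem_filter.mp (hF1 ▸ hcc)).2
      simpa using this
    have h' : ¬ (0 ≤ cc.2) := by omega
    simp [pvTag, pvLine, Function.comp, h, h']
  have hfilters : (F0 ++ F1).Perm L := by
    have hc : F1 = L.filter (fun cc => !(decide (0 ≤ cc.2))) := by
      rw [hF1]
      refine List.filter_congr ?_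
      intro cc _
      by_cases h : 0 ≤ cc.2
      · simp [h, show ¬ (cc.2 < 0) by omega]
      · simp [h, show cc.2 < 0 by omega]
    rw [hF0, hc]
    exact List.filter_append_perm _ L
  rcases pv_fold_invariant items with ⟨hBperm, hBsorted⟩
  have hperm : (A0.map (fun s => ((0 : Int), s)) ++ A1.map (fun s => ((1 : Int), s))).Perm
      (items.foldl (fun ordered kv => pvIns (pvTag kv) ordered) []) := by
    refine List.Perm.trans ?_ hBperm.symm
    refine List.Perm.trans ((hA0p.map _).append (hA1p.map _)) ?_
    rw [← hmap0, ← hmap1, ← List.map_append]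
    exact (hfilters.map pvTag).trans (hLperm.map pvTag)
  have hApair : (A0.map (fun s => ((0 : Int), s)) ++ A1.map (fun s => ((1 : Int), s))).Pairwise
      (fun a b => pvK a ≤ pvK b) := by
    rw [List.pairwise_append]
    refine ⟨?_, ?_, ?_⟩
    · rw [List.pairwise_map]
      have := PySem.List.sorted_pairwise (([] : List String) ++ F0.map pvLine) (fun s => s)
      rw [← hA0] at this
      exact this.imp (fun {a b} h => by simp [pvK, Prod.Lex.toLex_le_toLex, h])
    · rw [List.pairwise_map]
      have := PySem.List.sorted_pairwise (([] : List String) ++ F1.map pvLine) (fun s => s)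
      rw [← hA1] at this
      exact this.imp (fun {a b} h => by simp [pvK, Prod.Lex.toLex_le_toLex, h])
    · intro a ha b hb
      rcases List.mem_map.mp ha with ⟨s, _, rfl⟩
      rcases List.mem_map.mp hb with ⟨t, _, rfl⟩
      simp only [pvK, Prod.Lex.toLex_le_toLex]
      exact Or.inl (by norm_num)
  have hkey : A0.map (fun s => ((0 : Int), s)) ++ A1.map (fun s => ((1 : Int), s))
      = items.foldl (fun ordered kv => pvIns (pvTag kv) ordered) [] := by
    refine PySem.List.eq_of_perm_of_pairwise_le_of_injective pvK ?_ hperm hApair hBsorted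
    intro a b h
    rcases a with ⟨a1, a2⟩; rcases b with ⟨b1, b2⟩
    simpa [pvK] using toLex_inj.mp h
  rw [← hkey, List.map_append, List.map_map, List.map_map]
  simp

-- ===== VERDICT (by name: the statement is the Claim_ definition above) =====
theorem print_char_diff_spec : Claim_equal_print_char_diff := by
  intro cd _
  unfold Spec_print_char_diff
  simp only [print_char_diff, print_char_diff_alt]
  exact congrArg (PySem.Str.join "<br>") (pv_main ((PySem.Dict.ofList cd).items))
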